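-- pv_equiv track=rewrite | github.com/ahsantfw/PMF_Project1 | RedditScraper/step1_search_terms.py | chunk_search_terms
-- ===== SOURCE A (Python) =====
-- from typing import List, Dict, Any
--
-- def chunk_search_terms(terms: List[str], max_length: int = 50) -> List[str]:
--     """Split search terms into chunks for web search."""
--     chunks = []
--     current_chunk = []
--     current_length = 0
--
--     for term in terms:
--         term = term.strip()
--         add_length = len(term) if not current_chunk else len(' OR ') + len(term)
--
--         if current_length + add_length > max_length and current_chunk:
--             chunks.append(' OR '.join(current_chunk))
--             current_chunk = [term]
--             current_length = len(term)
--         else: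
--             if current_chunk:
--                 current_length += len(' OR ')
--             current_chunk.append(term)
--             current_length += len(term)
--
--     if current_chunk:
--         chunks.append(' OR '.join(current_chunk))
--
--     return chunks
-- ===== SOURCE B (Python) =====
-- from typing import List
--
-- def chunk_search_terms(terms: List[str], max_length: int = 50) -> List[str]:
--     """Split search terms into chunks for web search."""
--     remaining = [t.strip() for t in terms]
--     sep = len(' OR ')
--     chunks = []
--     while remaining:
--         length = len(remaining[0])
--         k = 1
--         while k < len(remaining) and length + sep + len(remaining[k]) <= max_length:
--             length += sep + len(remaining[k])
--             k += 1
--         chunks.append(' OR '.join(remaining[:k]))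
--         remaining = remaining[k:]
--     return chunks
-- ===== Notes on version B (the rewrite author's own statement) =====
-- stated objective: alternative
-- what changed: Replaces A's single flat pass with per-term accumulator state (chunks, current_chunk, current_length) by a chunk-at-a-time decomposition: strip all terms first, then an outer loop that finds the boundary of the next chunk with an inner fitting scan, joins a slice for the whole chunk at once, and continues on the remaining suffix.
import Mathlib
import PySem

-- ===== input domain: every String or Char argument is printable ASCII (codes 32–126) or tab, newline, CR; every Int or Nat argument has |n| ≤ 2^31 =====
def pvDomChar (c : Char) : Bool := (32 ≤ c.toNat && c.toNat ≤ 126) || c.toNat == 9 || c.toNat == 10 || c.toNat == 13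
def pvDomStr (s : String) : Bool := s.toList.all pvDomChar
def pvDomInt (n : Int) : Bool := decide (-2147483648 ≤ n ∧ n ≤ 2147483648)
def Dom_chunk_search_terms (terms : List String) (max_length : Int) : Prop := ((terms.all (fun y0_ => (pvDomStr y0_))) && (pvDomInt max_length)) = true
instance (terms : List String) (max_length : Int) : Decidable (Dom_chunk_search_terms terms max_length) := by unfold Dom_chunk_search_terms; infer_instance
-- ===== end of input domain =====

-- B replaces A's single flat pass with accumulator state by a chunk-at-a-time decomposition:
-- strip first, then repeatedly find the next chunk boundary and join a slice (objective: alternative).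

-- ===== PORT A =====
-- A's loop body: state = (chunks, current_chunk, current_length); 'term = term.strip()',
-- 'add_length = …', the if/else, all as in the Python
def chunkA_step (max_length : Int) (st : List String × List String × Int) (term : String) :
    List String × List String × Int :=
  let t := PySem.Str.strip term
  let add_length := if st.2.1 = [] then PySem.Str.len t
                    else PySem.Str.len " OR " + PySem.Str.len t
  if st.2.2 + add_length > max_length ∧ st.2.1 ≠ [] then
    (st.1 ++ [PySem.Str.join " OR " st.2.1], [t], PySem.Str.len t)
  else
    (st.1, st.2.1 ++ [t],
      (if st.2.1 ≠ [] then st.2.2 + PySem.Str.len " OR " else st.2.2) + PySem.Str.len t)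

def chunk_search_terms (terms : List String) (max_length : Int) : List String :=
  let st := terms.foldl (chunkA_step max_length) ([], [], 0)
  if st.2.1 ≠ [] then st.1 ++ [PySem.Str.join " OR " st.2.1] else st.1

-- ===== PORT B =====
-- B's inner while: starting from accumulated length `length`, how many further terms of
-- the remaining tail still fit (k - 1 in the Python)
def chunkB_scan (max_length : Int) (length : Int) : List String → Nat
  | [] => 0
  | t :: rest =>
      if length + PySem.Str.len " OR " + PySem.Str.len t ≤ max_length then
        1 + chunkB_scan max_length (length + PySem.Str.len " OR " + PySem.Str.len t) rest
      else 0

-- B's outer while over `remaining`: join the slice remaining[:k], continue on remaining[k:]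
def chunkB_loop (max_length : Int) : List String → List String
  | [] => []
  | t :: rest =>
      PySem.Str.join " OR " ((t :: rest).take (1 + chunkB_scan max_length (PySem.Str.len t) rest))
        :: chunkB_loop max_length ((t :: rest).drop (1 + chunkB_scan max_length (PySem.Str.len t) rest))
  termination_by ts => ts.length
  decreasing_by simp [List.length_drop]

def chunk_search_terms_alt (terms : List String) (max_length : Int) : List String :=
  chunkB_loop max_length (terms.map PySem.Str.strip)

-- ===== PRECONDITION & SPEC =====
def Spec_chunk_search_terms (terms : List String) (max_length : Int) (out : List String) : Prop := out = chunk_search_terms_alt terms max_length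
instance (terms : List String) (max_length : Int) (out : List String) : Decidable (Spec_chunk_search_terms terms max_length out) := by unfold Spec_chunk_search_terms; infer_instance

-- ===== CLAIM (what is proved, stated in full; the proofs are below) =====
def Claim_equal_chunk_search_terms : Prop := ∀ (terms : List String) (max_length : Int), Dom_chunk_search_terms terms max_length → Spec_chunk_search_terms terms max_length (chunk_search_terms terms max_length)

-- ===== LEMMAS AND PROOFS =====

-- A's step with the strip pulled out (for reasoning over the pre-stripped list)
def chunkA_step' (max_length : Int) (st : List String × List String × Int) (t : String) :
    List String × List String × Int :=
  let add_length := if st.2.1 = [] then PySem.Str.len t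
                    else PySem.Str.len " OR " + PySem.Str.len t
  if st.2.2 + add_length > max_length ∧ st.2.1 ≠ [] then
    (st.1 ++ [PySem.Str.join " OR " st.2.1], [t], PySem.Str.len t)
  else
    (st.1, st.2.1 ++ [t],
      (if st.2.1 ≠ [] then st.2.2 + PySem.Str.len " OR " else st.2.2) + PySem.Str.len t)

theorem foldlA_strip (terms : List String) (max_length : Int)
    (st : List String × List String × Int) :
    terms.foldl (chunkA_step max_length) st
      = (terms.map PySem.Str.strip).foldl (chunkA_step' max_length) st := by
  rw [List.foldl_map]; rfl

-- length of ' OR '.join([t])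
theorem len_join_singleton (t : String) :
    PySem.Str.len (PySem.Str.join " OR " [t]) = PySem.Str.len t := by
  simp [PySem.Str.len_eq, PySem.Str.toList_join, PySem.Chars.join_singleton]

-- length of ' OR '.join(xs ++ [t]) for nonempty xs
theorem len_join_append (xs : List String) (t : String) (h : xs ≠ []) :
    PySem.Str.len (PySem.Str.join " OR " (xs ++ [t]))
      = PySem.Str.len (PySem.Str.join " OR " xs) + PySem.Str.len " OR " + PySem.Str.len t := by
  induction xs with
  | nil => exact absurd rfl h
  | cons a xs ih =>
    cases xs with
    | nil =>
      simp [PySem.Str.len_eq, PySem.Str.toList_join, PySem.Chars.join_cons_cons,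
        PySem.Chars.join_singleton]
      ring
    | cons b xs =>
      have key := ih (by simp)
      simp only [PySem.Str.len_eq, PySem.Str.toList_join, List.cons_append, List.map_cons] at key ⊢
      rw [PySem.Chars.join_cons_cons, PySem.Chars.join_cons_cons " OR ".toList a.toList]
      simp only [List.length_append]
      push_cast at key ⊢
      omega

-- A's finish step
def finishA (st : List String × List String × Int) : List String :=
  if st.2.1 ≠ [] then st.1 ++ [PySem.Str.join " OR " st.2.1] else st.1

-- equation lemmas for the well-founded chunkB_loop
theorem chunkB_loop_nil (max_length : Int) : chunkB_loop max_length [] = [] := by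
  simp only [chunkB_loop.eq_def]

theorem take_one_add {α : Type} (n : Nat) (a : α) (l : List α) :
    (a :: l).take (1 + n) = a :: l.take n := by
  rw [Nat.add_comm]; rfl

theorem drop_one_add {α : Type} (n : Nat) (a : α) (l : List α) :
    (a :: l).drop (1 + n) = l.drop n := by
  rw [Nat.add_comm]; rfl

theorem chunkB_loop_cons (max_length : Int) (t : String) (rest : List String) :
    chunkB_loop max_length (t :: rest)
      = PySem.Str.join " OR " (t :: rest.take (chunkB_scan max_length (PySem.Str.len t) rest))
        :: chunkB_loop max_length (rest.drop (chunkB_scan max_length (PySem.Str.len t) rest)) := by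
  conv_lhs => rw [chunkB_loop.eq_def]
  show PySem.Str.join " OR " (List.take (1 + chunkB_scan max_length (PySem.Str.len t) rest) (t :: rest))
      :: chunkB_loop max_length (List.drop (1 + chunkB_scan max_length (PySem.Str.len t) rest) (t :: rest)) = _
  rw [take_one_add, drop_one_add]

-- main invariant: from a nonempty current chunk `cur` with current_length = len(join(cur)),
-- A's remaining fold produces exactly the chunk B's scan delimits, then B's loop on the rest
theorem loopA_eq (max_length : Int) (ts : List String) (chunks cur : List String) (h : cur ≠ []) :
    finishA (ts.foldl (chunkA_step' max_length)
        (chunks, cur, PySem.Str.len (PySem.Str.join " OR " cur)))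
      = chunks
          ++ PySem.Str.join " OR "
              (cur ++ ts.take (chunkB_scan max_length
                  (PySem.Str.len (PySem.Str.join " OR " cur)) ts))
            :: chunkB_loop max_length
              (ts.drop (chunkB_scan max_length
                  (PySem.Str.len (PySem.Str.join " OR " cur)) ts)) := by
  induction ts generalizing chunks cur with
  | nil => simp [finishA, chunkB_scan, chunkB_loop_nil, h]
  | cons t rest ih =>
    by_cases hle : PySem.Str.len (PySem.Str.join " OR " cur)
        + PySem.Str.len " OR " + PySem.Str.len t ≤ max_length
    · -- term fits: A extends current chunk, B's scan counts it
      have hstep : chunkA_step' max_length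
            (chunks, cur, PySem.Str.len (PySem.Str.join " OR " cur)) t
          = (chunks, cur ++ [t],
              PySem.Str.len (PySem.Str.join " OR " (cur ++ [t]))) := by
        simp only [chunkA_step']
        rw [if_neg h, if_neg (by intro hcon; omega), if_pos h, len_join_append cur t h]
      have hscan : chunkB_scan max_length (PySem.Str.len (PySem.Str.join " OR " cur)) (t :: rest)
          = 1 + chunkB_scan max_length (PySem.Str.len (PySem.Str.join " OR " (cur ++ [t]))) rest := by
        simp only [chunkB_scan]
        rw [if_pos hle, len_join_append cur t h]
      rw [List.foldl_cons, hstep, ih chunks (cur ++ [t]) (by simp), hscan,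
        take_one_add, drop_one_add]
      simp [List.append_assoc]
    · -- term does not fit: A closes the chunk, B's scan stops
      have hstep : chunkA_step' max_length
            (chunks, cur, PySem.Str.len (PySem.Str.join " OR " cur)) t
          = (chunks ++ [PySem.Str.join " OR " cur], [t], PySem.Str.len t) := by
        simp only [chunkA_step']
        rw [if_neg h, if_pos ⟨by omega, h⟩]
      have hscan : chunkB_scan max_length (PySem.Str.len (PySem.Str.join " OR " cur)) (t :: rest)
          = 0 := by
        simp only [chunkB_scan]
        rw [if_neg hle]
      have ih' := ih (chunks ++ [PySem.Str.join " OR " cur]) [t] (by simp)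
      rw [List.foldl_cons, hstep, hscan, List.take_zero, List.drop_zero,
        show (PySem.Str.len t) = PySem.Str.len (PySem.Str.join " OR " [t]) from
          (len_join_singleton t).symm,
        ih', chunkB_loop_cons,
        show (PySem.Str.len t) = PySem.Str.len (PySem.Str.join " OR " [t]) from
          (len_join_singleton t).symm]
      simp [List.append_assoc]

-- the whole run, over the pre-stripped list
theorem main_eq (max_length : Int) (ts : List String) :
    finishA (ts.foldl (chunkA_step' max_length) ([], [], 0))
      = chunkB_loop max_length ts := by
  cases ts with
  | nil => simp [finishA, chunkB_loop_nil]
  | cons t rest =>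
    have hstep : chunkA_step' max_length ([], [], 0) t = ([], [t], PySem.Str.len t) := by
      simp [chunkA_step']
    rw [List.foldl_cons, hstep, chunkB_loop_cons,
      show (PySem.Str.len t) = PySem.Str.len (PySem.Str.join " OR " [t]) from
        (len_join_singleton t).symm,
      loopA_eq max_length rest [] [t] (by simp)]
    simp

-- ===== VERDICT (by name: the statement is the Claim_ definition above) =====
theorem chunk_search_terms_spec : Claim_equal_chunk_search_terms := by
  intro terms max_length _
  unfold Spec_chunk_search_terms chunk_search_terms chunk_search_terms_alt
  rw [foldlA_strip]
  exact main_eq max_length (terms.map PySem.Str.strip)
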